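-- pv_equiv track=rewrite | github.com/mrsxman/asadbeshakx_ku | zadacha7.py | kritilgan_tortburchak
-- ===== SOURCE A (Python) =====
-- def kritilgan_tortburchak(n, a, b):
--     max_perimeter = 0
--     max_a, max_b = 0, 0
--
--     for i in range(1, n + 1):
--         for j in range(i, n + 1):
--             if i * j <= n:
--                 perimeter = 2 * (i + j)
--                 if perimeter > max_perimeter and i <= a and j <= b:
--                     max_perimeter = perimeter
--                     max_a, max_b = i, j
--
--     return max_a, max_b
-- ===== SOURCE B (Python) =====
-- def kritilgan_tortburchak(n, a, b):
--     cands = [(i, min(n // i, b))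
--              for i in range(1, min(a, n) + 1)
--              if i <= min(n // i, b)]
--     return max(cands, key=lambda t: t[0] + t[1], default=(0, 0))
-- ===== Notes on version B (the rewrite author's own statement) =====
-- stated objective: faster
-- what changed: Replaced A's O(n^2) accumulator scan over all pairs (i,j) by building the O(min(a,n)) list of candidate pairs (i, min(n//i,b)) with a comprehension and selecting the best one with max(..., key=perimeter, default=(0,0)).
import Mathlib
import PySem

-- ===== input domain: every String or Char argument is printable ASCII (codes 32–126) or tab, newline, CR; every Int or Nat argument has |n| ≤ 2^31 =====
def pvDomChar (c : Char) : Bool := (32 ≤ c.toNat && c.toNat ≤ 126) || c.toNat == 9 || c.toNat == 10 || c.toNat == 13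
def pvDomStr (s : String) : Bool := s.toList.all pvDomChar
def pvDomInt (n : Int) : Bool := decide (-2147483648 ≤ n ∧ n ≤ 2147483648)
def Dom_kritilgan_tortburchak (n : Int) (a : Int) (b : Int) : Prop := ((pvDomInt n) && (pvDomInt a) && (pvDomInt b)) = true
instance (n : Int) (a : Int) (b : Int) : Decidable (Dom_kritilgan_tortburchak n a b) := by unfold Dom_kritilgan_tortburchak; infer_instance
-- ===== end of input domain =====

-- B replaces A's O(n^2) accumulator scan over all pairs by an O(min(a,n)) candidate
-- list (i, min(n//i,b)) selected with a first-maximum-by-key pass (Python max with default).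


-- ===== PORT A =====
-- literal port: state (max_perimeter, max_a, max_b), nested folds over range(1,n+1) / range(i,n+1)
def kritilgan_tortburchak (n : Int) (a : Int) (b : Int) : List Int :=
  let st :=
    (PySem.List.pyRange 1 (n + 1) 1).foldl (fun s i =>
      (PySem.List.pyRange i (n + 1) 1).foldl (fun s j =>
        if i * j ≤ n then
          if 2 * (i + j) > s.1 ∧ i ≤ a ∧ j ≤ b then (2 * (i + j), i, j) else s
        else s) s) ((0 : Int), (0 : Int), (0 : Int))
  [st.2.1, st.2.2]

-- ===== PORT B =====
-- literal port of Source B: comprehension over range(1, min(a,n)+1) building the pairs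
-- (i, min(n//i,b)) with i ≤ min(n//i,b), then max(..., key = sum, default = (0,0))
def kritilgan_tortburchak_alt (n : Int) (a : Int) (b : Int) : List Int :=
  let cands := ((PySem.List.pyRange 1 (min a n + 1) 1).map
      (fun i => (i, min (PySem.Int.floordiv n i) b))).filter
      (fun t => decide (t.1 ≤ t.2))
  let best := PySem.List.maxD cands (fun t => t.1 + t.2) ((0 : Int), (0 : Int))
  [best.1, best.2]

-- ===== PRECONDITION & SPEC =====
def Spec_kritilgan_tortburchak (n : Int) (a : Int) (b : Int) (out : List Int) : Prop := out = kritilgan_tortburchak_alt n a b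
instance (n : Int) (a : Int) (b : Int) (out : List Int) : Decidable (Spec_kritilgan_tortburchak n a b out) := by unfold Spec_kritilgan_tortburchak; infer_instance

-- ===== CLAIM =====
def Claim_equal_kritilgan_tortburchak : Prop := ∀ (n : Int) (a : Int) (b : Int), Dom_kritilgan_tortburchak n a b → Spec_kritilgan_tortburchak n a b (kritilgan_tortburchak n a b)

-- ===== LEMMAS AND PROOFS =====

-- A's inner-loop body for a fixed i
def pvInnerA (n a b i : Int) (s : Int × Int × Int) (j : Int) : Int × Int × Int :=
  if i * j ≤ n then
    if 2 * (i + j) > s.1 ∧ i ≤ a ∧ j ≤ b then (2 * (i + j), i, j) else s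
  else s

theorem pvInnerA_noop (n a b i : Int) (ha : ¬ i ≤ a) :
    ∀ (l : List Int) (s : Int × Int × Int), l.foldl (pvInnerA n a b i) s = s := by
  intro l
  induction l with
  | nil => intro s; rfl
  | cons x xs ih =>
    intro s
    simp only [List.foldl_cons, pvInnerA]
    split_ifs with h1 h2
    · exact absurd h2.2.1 ha
    · exact ih s
    · exact ih s

-- i*k ≤ n ↔ k ≤ n//i, for 0 < i
theorem pvDivBound (n i k : Int) (hi : 0 < i) :
    i * k ≤ n ↔ k ≤ PySem.Int.floordiv n i := by
  rw [mul_comm]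
  exact (PySem.Int.le_floordiv_iff_mul_le (a := n) (b := i) (q := k) hi).symm

-- the key inner-loop characterisation: folding A's inner body over [k, n+1) acts like one step
theorem pvInner_eq_aux (n a b i : Int) (hi : 0 < i) (ha : i ≤ a) :
    ∀ (m : Nat) (k : Int), i ≤ k → (n + 1 - k).toNat = m →
      ∀ (s : Int × Int × Int),
        (PySem.List.pyRange k (n + 1) 1).foldl (pvInnerA n a b i) s =
          (if k ≤ min (PySem.Int.floordiv n i) b ∧
              2 * (i + min (PySem.Int.floordiv n i) b) > s.1
           then (2 * (i + min (PySem.Int.floordiv n i) b), i, min (PySem.Int.floordiv n i) b)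
           else s) := by
  intro m
  induction m with
  | zero =>
    intro k hik hm s
    have hk : n + 1 ≤ k := by omega
    rw [PySem.List.pyRange_one_eq_nil hk]
    simp only [List.foldl_nil]
    have hfd : PySem.Int.floordiv n i < k := by
      by_cases hn : 0 ≤ n
      · have := (pvDivBound n i (PySem.Int.floordiv n i) hi).2 le_rfl
        nlinarith
      · by_cases h0 : 0 ≤ PySem.Int.floordiv n i
        · have := (pvDivBound n i 0 hi).2 h0
          omega
        · omega
    exact Eq.symm (if_neg (by
      intro (h : k ≤ min (PySem.Int.floordiv n i) b ∧
        2 * (i + min (PySem.Int.floordiv n i) b) > s.1)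
      omega))
  | succ m ih =>
    intro k hik hm s
    have hk : k < n + 1 := by omega
    rw [PySem.List.pyRange_one_cons hk]
    simp only [List.foldl_cons]
    set jm := min (PySem.Int.floordiv n i) b with hjm
    have hmul : i * k ≤ n ↔ k ≤ PySem.Int.floordiv n i := pvDivBound n i k hi
    have ih' := ih (k + 1) (by omega) (by omega)
    by_cases hkjm : k ≤ jm
    · have hik2 : i * k ≤ n := hmul.2 (le_trans hkjm (min_le_left _ _))
      have hkb : k ≤ b := le_trans hkjm (min_le_right _ _)
      by_cases hgt : 2 * (i + k) > s.1
      · have hfk : pvInnerA n a b i s k = (2 * (i + k), i, k) := by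
          simp [pvInnerA, hik2, hgt, ha, hkb]
        rw [hfk, ih']
        rcases eq_or_lt_of_le hkjm with heq | hlt
        · rw [if_neg (by
            show ¬ (k + 1 ≤ jm ∧ 2 * (i + jm) > 2 * (i + k)); omega),
            if_pos ⟨hkjm, by omega⟩, ← heq]
        · rw [if_pos ⟨by omega, by show 2 * (i + jm) > 2 * (i + k); omega⟩,
            if_pos ⟨hkjm, by omega⟩]
      · have hfk : pvInnerA n a b i s k = s := by
          simp only [pvInnerA, if_pos hik2]
          have hng : ¬ (2 * (i + k) > s.1 ∧ i ≤ a ∧ k ≤ b) := fun h => hgt h.1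
          exact if_neg hng
        rw [hfk, ih']
        rcases eq_or_lt_of_le hkjm with heq | hlt
        · rw [if_neg (by omega), if_neg (by intro h; rw [← heq] at h; omega)]
        · by_cases hg2 : 2 * (i + jm) > s.1
          · rw [if_pos ⟨by omega, hg2⟩, if_pos ⟨hkjm, hg2⟩]
          · rw [if_neg (by intro h; exact hg2 h.2), if_neg (by intro h; exact hg2 h.2)]
    · have hfk : pvInnerA n a b i s k = s := by
        by_cases hik2 : i * k ≤ n
        · have hkb : ¬ k ≤ b := fun h => hkjm (le_min (hmul.1 hik2) h)
          simp only [pvInnerA, if_pos hik2]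
          have hng : ¬ (2 * (i + k) > s.1 ∧ i ≤ a ∧ k ≤ b) := fun h => hkb h.2.2
          exact if_neg hng
        · simp [pvInnerA, hik2]
      rw [hfk, ih']
      rw [if_neg (by intro h; omega), if_neg (by intro h; exact hkjm h.1)]

theorem pvInner_eq (n a b i : Int) (hi : 0 < i) (ha : i ≤ a) (s : Int × Int × Int) :
    (PySem.List.pyRange i (n + 1) 1).foldl (pvInnerA n a b i) s =
      (if i ≤ min (PySem.Int.floordiv n i) b ∧
          2 * (i + min (PySem.Int.floordiv n i) b) > s.1
       then (2 * (i + min (PySem.Int.floordiv n i) b), i, min (PySem.Int.floordiv n i) b)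
       else s) :=
  pvInner_eq_aux n a b i hi ha (n + 1 - i).toNat i le_rfl rfl s

-- B-side vocabulary: candidate pair for i, the plain first-max fold step
def pvCand (n b i : Int) : Int × Int := (i, min (PySem.Int.floordiv n i) b)

def pvPack (t : Int × Int) : Int × Int × Int := (2 * (t.1 + t.2), t.1, t.2)

def pvStep (m x : Int × Int) : Int × Int := if m.1 + m.2 < x.1 + x.2 then x else m

-- A's condensed outer step on packed states is pvStep on the filtered candidates
theorem pvFold_pack (n b : Int) :
    ∀ (l : List Int) (t : Int × Int),
      l.foldl (fun s i =>
          if i ≤ min (PySem.Int.floordiv n i) b ∧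
              2 * (i + min (PySem.Int.floordiv n i) b) > s.1
          then (2 * (i + min (PySem.Int.floordiv n i) b), i, min (PySem.Int.floordiv n i) b)
          else s) (pvPack t) =
        pvPack (((l.map (pvCand n b)).filter (fun t => decide (t.1 ≤ t.2))).foldl pvStep t) := by
  intro l
  induction l with
  | nil => intro t; rfl
  | cons x xs ih =>
    intro t
    simp only [List.map_cons, List.foldl_cons]
    by_cases hg : (pvCand n b x).1 ≤ (pvCand n b x).2
    · rw [List.filter_cons_of_pos (by simpa using hg), List.foldl_cons]
      have hx : (if x ≤ min (PySem.Int.floordiv n x) b ∧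
            2 * (x + min (PySem.Int.floordiv n x) b) > (pvPack t).1
          then (2 * (x + min (PySem.Int.floordiv n x) b), x, min (PySem.Int.floordiv n x) b)
          else pvPack t) = pvPack (pvStep t (pvCand n b x)) := by
        simp only [pvPack, pvStep, pvCand] at *
        by_cases hlt : t.1 + t.2 < x + min (PySem.Int.floordiv n x) b
        · rw [if_pos ⟨hg, by omega⟩, if_pos hlt]
        · rw [if_neg (by omega), if_neg hlt]
      rw [hx, ih]
    · rw [List.filter_cons_of_neg (by simpa using hg)]
      have hx : (if x ≤ min (PySem.Int.floordiv n x) b ∧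
            2 * (x + min (PySem.Int.floordiv n x) b) > (pvPack t).1
          then (2 * (x + min (PySem.Int.floordiv n x) b), x, min (PySem.Int.floordiv n x) b)
          else pvPack t) = pvPack t := by
        simp only [pvCand] at hg
        exact if_neg (by intro h; exact hg h.1)
      rw [hx, ih]

-- Python's max(.., key, default) on m :: cs is the plain first-max fold from m
theorem pvMaxAux (cs : List (Int × Int)) :
    ∀ (m : Int × Int),
      PySem.List.maxD (m :: cs) (fun t => t.1 + t.2) ((0 : Int), (0 : Int)) =
        cs.foldl pvStep m := by
  induction cs with
  | nil => intro m; rfl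
  | cons x xs ih =>
    intro m
    have h1 : PySem.List.maxD (m :: x :: xs) (fun t => t.1 + t.2) ((0 : Int), (0 : Int)) =
        PySem.List.maxD (pvStep m x :: xs) (fun t => t.1 + t.2) ((0 : Int), (0 : Int)) := by
      simp only [PySem.List.maxD, PySem.List.max?, List.foldl_cons, pvStep]
      by_cases h : m.1 + m.2 < x.1 + x.2 <;> simp [h]
    rw [List.foldl_cons, h1, ih (pvStep m x)]

-- the plain fold from the default (0,0) is maxD, when every key is positive
theorem pvFold_maxD (l : List (Int × Int)) (hpos : ∀ x ∈ l, 0 < x.1 + x.2) :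
    l.foldl pvStep ((0 : Int), (0 : Int)) =
      PySem.List.maxD l (fun t => t.1 + t.2) ((0 : Int), (0 : Int)) := by
  cases l with
  | nil => rfl
  | cons c cs =>
    have hc : pvStep ((0 : Int), (0 : Int)) c = c := by
      have := hpos c (by simp)
      simp only [pvStep]
      rw [if_pos (by omega)]
    rw [List.foldl_cons, hc, pvMaxAux cs c]

theorem pvMain (n a b : Int) :
    kritilgan_tortburchak n a b = kritilgan_tortburchak_alt n a b := by
  have key : (PySem.List.pyRange 1 (n + 1) 1).foldl
      (fun s i => (PySem.List.pyRange i (n + 1) 1).foldl (pvInnerA n a b i) s)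
      ((0 : Int), (0 : Int), (0 : Int)) =
    (PySem.List.pyRange 1 (min a n + 1) 1).foldl
      (fun s i =>
        if i ≤ min (PySem.Int.floordiv n i) b ∧
            2 * (i + min (PySem.Int.floordiv n i) b) > s.1
        then (2 * (i + min (PySem.Int.floordiv n i) b), i, min (PySem.Int.floordiv n i) b)
        else s) ((0 : Int), (0 : Int), (0 : Int)) := by
    have hsplit : PySem.List.pyRange 1 (n + 1) 1 =
        PySem.List.pyRange 1 (max 1 (min a n + 1)) 1 ++
        PySem.List.pyRange (max 1 (min a n + 1)) (n + 1) 1 := by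
      by_cases hn : n + 1 ≤ 1
      · rw [PySem.List.pyRange_one_eq_nil hn, PySem.List.pyRange_one_eq_nil (by omega),
          PySem.List.pyRange_one_eq_nil (by omega)]
        simp
      · exact PySem.List.pyRange_one_append 1 (max 1 (min a n + 1)) (n + 1)
          (le_max_left _ _) (by omega)
    have hB : PySem.List.pyRange 1 (min a n + 1) 1 =
        PySem.List.pyRange 1 (max 1 (min a n + 1)) 1 := by
      by_cases h : min a n + 1 ≤ 1
      · rw [PySem.List.pyRange_one_eq_nil h, PySem.List.pyRange_one_eq_nil (by omega)]
      · congr 1; omega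
    rw [hsplit, List.foldl_append, hB]
    -- the tail segment is a no-op: every i there has a < i
    have hnoop : ∀ (l : List Int), (∀ i ∈ l, a < i) →
        ∀ s, l.foldl (fun s i => (PySem.List.pyRange i (n + 1) 1).foldl (pvInnerA n a b i) s) s = s := by
      intro l
      induction l with
      | nil => intro _ s; rfl
      | cons x xs ih =>
        intro h s
        simp only [List.foldl_cons]
        rw [pvInnerA_noop n a b x (by have := h x (by simp); omega)]
        exact ih (fun i hi => h i (by simp [hi])) s
    rw [hnoop _ (by
      intro i hi
      rw [PySem.List.mem_pyRange_one] at hi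
      omega)]
    -- the head segment: A's inner loop acts like one condensed step, pointwise
    have hcong : ∀ (l : List Int), (∀ i ∈ l, 0 < i ∧ i ≤ a) →
        ∀ s, l.foldl (fun s i => (PySem.List.pyRange i (n + 1) 1).foldl (pvInnerA n a b i) s) s =
          l.foldl (fun s i =>
            if i ≤ min (PySem.Int.floordiv n i) b ∧
                2 * (i + min (PySem.Int.floordiv n i) b) > s.1
            then (2 * (i + min (PySem.Int.floordiv n i) b), i, min (PySem.Int.floordiv n i) b)
            else s) s := by
      intro l
      induction l with
      | nil => intro _ s; rfl
      | cons x xs ih =>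
        intro h s
        obtain ⟨hx0, hxa⟩ := h x (by simp)
        simp only [List.foldl_cons]
        rw [pvInner_eq n a b x hx0 hxa s]
        exact ih (fun i hi => h i (by simp [hi])) _
    exact hcong _ (by
      intro i hi
      rw [PySem.List.mem_pyRange_one] at hi
      constructor <;> omega) _
  unfold kritilgan_tortburchak kritilgan_tortburchak_alt
  have hlam : ∀ i : Int, (fun (s : Int × Int × Int) (j : Int) =>
      if i * j ≤ n then
        if 2 * (i + j) > s.1 ∧ i ≤ a ∧ j ≤ b then (2 * (i + j), i, j) else s
      else s) = pvInnerA n a b i := fun i => rfl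
  simp only [hlam]
  rw [key]
  have h00 : ((0 : Int), (0 : Int), (0 : Int)) = pvPack ((0 : Int), (0 : Int)) := rfl
  rw [h00, pvFold_pack n b]
  have hmap : (PySem.List.pyRange 1 (min a n + 1) 1).map (pvCand n b) =
      (PySem.List.pyRange 1 (min a n + 1) 1).map
        (fun i => (i, min (PySem.Int.floordiv n i) b)) := rfl
  rw [pvFold_maxD _ (by
    intro x hx
    simp only [List.mem_filter, List.mem_map] at hx
    obtain ⟨⟨i, hi, hxc⟩, hle⟩ := hx
    rw [PySem.List.mem_pyRange_one] at hi
    subst hxc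
    simp only [pvCand, decide_eq_true_eq] at hle ⊢
    show 0 < i + min (PySem.Int.floordiv n i) b
    omega), hmap]
  simp [pvPack]

-- ===== VERDICT =====
theorem kritilgan_tortburchak_spec : Claim_equal_kritilgan_tortburchak := by
  intro n a b _
  unfold Spec_kritilgan_tortburchak
  exact pvMain n a b
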